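-- pv_equiv track=rewrite | github.com/GuilhermeEger/atividadesPython | schoolGrades.py | separeteList
-- ===== SOURCE A (Python) =====
-- def createList(r1, r2):
--     return [item for item in range(r1, r2+1)]
--
-- def separeteList(mode):
--     list = createList(0, 50)
--     for ele in list:
--         if mode == 2 and (ele % 2 == 0):
--             list.remove(ele)
--         elif ele % 2 == 1:
--             list.remove(ele)
--     return list
-- ===== SOURCE B (Python) =====
-- def separeteList(mode):
--     # Closed form: A's remove-while-iterating leaves exactly the odds 1..49 when
--     # mode == 2, and exactly the evens 0..50 otherwise.
--     if mode == 2: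
--         return list(range(1, 50, 2))
--     return list(range(0, 51, 2))
-- ===== Notes on version B (the rewrite author's own statement) =====
-- stated objective: simpler
-- what changed: Replaced the mutate-while-iterating loop over the fixed 0..50 list by a closed-form two-branch range: odds 1..49 for mode==2, evens 0..50 otherwise.
import Mathlib
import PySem

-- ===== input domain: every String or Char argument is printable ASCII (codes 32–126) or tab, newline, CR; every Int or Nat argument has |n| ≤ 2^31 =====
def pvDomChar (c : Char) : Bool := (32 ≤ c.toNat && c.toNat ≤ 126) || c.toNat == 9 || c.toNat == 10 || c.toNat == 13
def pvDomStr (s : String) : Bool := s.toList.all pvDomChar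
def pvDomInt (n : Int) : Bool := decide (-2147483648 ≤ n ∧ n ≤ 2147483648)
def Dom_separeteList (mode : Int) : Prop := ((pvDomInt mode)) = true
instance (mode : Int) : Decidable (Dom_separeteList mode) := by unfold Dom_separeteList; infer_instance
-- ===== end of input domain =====

-- B replaces A's mutate-while-iterating loop by a closed-form range (simpler).

-- ===== PORT A =====
-- CPython's for-over-a-mutating-list: an index that advances by one each step over the
-- current list; exact transliteration of A's loop body. list.remove never raises here
-- (the removed element is the current element of the list), so getD lst is only a
-- type-level default. The fuel is only a totality guard: the index grows by one each
-- step and the list never grows, so fuel = initial length always suffices.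
def sepLoop (m2 : Bool) : Nat → Nat → List Int → List Int
  | 0, _, lst => lst
  | fuel + 1, i, lst =>
    if h : i < lst.length then
      let ele := lst[i]
      let lst' :=
        if m2 && (PySem.Int.mod ele 2 == 0) then (PySem.List.remove? lst ele).getD lst
        else if PySem.Int.mod ele 2 == 1 then (PySem.List.remove? lst ele).getD lst
        else lst
      sepLoop m2 fuel (i + 1) lst'
    else lst

def createList (r1 r2 : Int) : List Int := (PySem.List.pyRange r1 (r2 + 1) 1).map (fun item => item)

def separeteList (mode : Int) : List Int :=
  sepLoop (mode == 2) (createList 0 50).length 0 (createList 0 50)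

-- ===== PORT B =====
def separeteList_alt (mode : Int) : List Int :=
  if mode == 2 then PySem.List.pyRange 1 50 2 else PySem.List.pyRange 0 51 2

-- ===== PRECONDITION & SPEC =====
def Spec_separeteList (mode : Int) (out : List Int) : Prop := out = separeteList_alt mode
instance (mode : Int) (out : List Int) : Decidable (Spec_separeteList mode out) := by unfold Spec_separeteList; infer_instance

-- ===== CLAIM (what is proved, stated in full; the proofs are below) =====
def Claim_equal_separeteList : Prop := ∀ (mode : Int), Dom_separeteList mode → Spec_separeteList mode (separeteList mode)

-- ===== LEMMAS AND PROOFS =====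
theorem sep_two : sepLoop true (createList 0 50).length 0 (createList 0 50) = PySem.List.pyRange 1 50 2 := by decide

theorem sep_other : sepLoop false (createList 0 50).length 0 (createList 0 50) = PySem.List.pyRange 0 51 2 := by decide

-- ===== VERDICT (by name: the statement is the Claim_ definition above) =====
theorem separeteList_spec : Claim_equal_separeteList := by
  intro mode _
  unfold Spec_separeteList separeteList separeteList_alt
  by_cases h : mode = 2
  · simp [h, sep_two]
  · have hb : (mode == 2) = false := by simpa using h
    simp [hb, sep_other]
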